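-- pv_equiv track=rewrite | github.com/lost-20/NIR | Dominant_number.py | converting_graph6
-- ===== SOURCE A (Python) =====
-- def converting_graph6(str_graph):
--     byte = str_graph.encode('UTF-8')
--     n = byte[0] - 63
--     graph = {i: [] for i in range(n)}
--     code_string = ""
--     for i in range(1, len(byte)):
--         code_string += format(byte[i] - 63, '06b')
--     counter = 0
--     for i in range(1, n):
--         for j in range(i):
--             if code_string[counter] == "1":
--                 graph[j].append(i)
--                 graph[i].append(j)
--             counter += 1
--     vertex = [i for i in range(len(graph))]
--     edges = []
--     for i in range(len(graph)):
--         for j in graph[i]: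
--             edges.append((i, j))
--     return vertex, edges
-- ===== SOURCE B (Python) =====
-- def converting_graph6(str_graph):
--     byte = str_graph.encode('UTF-8')
--     n = byte[0] - 63
--     bits = "".join(format(b - 63, '06b') for b in byte[1:])
--
--     def connected(a, b):
--         i, j = (a, b) if a > b else (b, a)
--         return bits[i * (i - 1) // 2 + j] == "1"
--
--     vertex = list(range(n))
--     edges = [(a, b) for a in range(n) for b in range(n) if a != b and connected(a, b)]
--     return vertex, edges
-- ===== Notes on version B (the rewrite author's own statement) =====
-- stated objective: alternative
-- what changed: B drops A's dict-of-adjacency-lists and sequential bit counter: it computes each pair's bit position arithmetically (i*(i-1)//2+j) and emits the edge list with one comprehension over ordered vertex pairs.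
import Mathlib
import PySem

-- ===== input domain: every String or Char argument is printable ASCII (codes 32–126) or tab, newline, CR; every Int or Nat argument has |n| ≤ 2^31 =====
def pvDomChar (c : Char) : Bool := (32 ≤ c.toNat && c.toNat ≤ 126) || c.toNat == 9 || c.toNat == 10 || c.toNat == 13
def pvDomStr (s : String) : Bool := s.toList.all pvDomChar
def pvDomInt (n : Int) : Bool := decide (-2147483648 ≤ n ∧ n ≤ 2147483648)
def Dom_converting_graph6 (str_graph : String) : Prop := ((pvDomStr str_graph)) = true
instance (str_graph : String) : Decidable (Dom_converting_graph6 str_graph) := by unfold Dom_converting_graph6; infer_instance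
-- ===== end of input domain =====

-- B replaces A's adjacency-list dict and sequential bit counter by a closed-form bit index
-- (i*(i-1)//2 + j) and a single comprehension over ordered vertex pairs (objective: alternative).

-- ===== PORT A =====
-- binary digits of a Nat, most significant first (fuel-based; '0' for 0) — bin(n) without the '0b'
def pvBin : Nat → Nat → List Char
  | 0, _ => []
  | fuel + 1, n => if n = 0 then [] else pvBin fuel (n / 2) ++ [if n % 2 = 1 then '1' else '0']

def pvBinStr (n : Nat) : List Char := if n = 0 then ['0'] else pvBin n n

-- format(x, '06b'): sign-aware zero padding to width 6 (Python's zfill rule)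
def pvFmt06b (x : Int) : List Char :=
  PySem.Chars.zfill ((if x < 0 then ['-'] else []) ++ pvBinStr x.natAbs) 6

-- body of A's inner loop: read code_string[counter], append to both adjacency lists, counter += 1
def pvStepInner (C : List Char) (i : Int) (st : PySem.Dict Int (List Int) × Int) (j : Int) :
    PySem.Dict Int (List Int) × Int :=
  let st' := if PySem.List.pyGet? C st.2 = some '1'
    then ((st.1.modify j [] (fun l => l ++ [i])).modify i [] (fun l => l ++ [j]), st.2)
    else st
  (st'.1, st'.2 + 1)

-- A's outer loop body: 'for j in range(i)'
def pvStepOuter (C : List Char) (st : PySem.Dict Int (List Int) × Int) (i : Int) :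
    PySem.Dict Int (List Int) × Int :=
  (PySem.List.pyRange 0 i).foldl (pvStepInner C i) st

-- graph = {i: [] for i in range(n)}
def pvGraph0 (n : Int) : PySem.Dict Int (List Int) :=
  (PySem.List.pyRange 0 n).foldl (fun d i => d.insert i ([] : List Int)) PySem.Dict.empty

-- str.encode('UTF-8') is the list of code points on the ASCII domain Dom_; byte[0] on the empty
-- string raises (excluded by Pre_), as does code_string[counter] past the end (excluded by Pre_).
def converting_graph6 (str_graph : String) : List Int × (List (Int × Int)) :=
  let byte : List Int := str_graph.toList.map (fun c => (c.toNat : Int))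
  let n : Int := PySem.List.pyGetD byte 0 0 - 63
  let code_string : List Char :=
    (PySem.List.pyRange 1 (PySem.List.len byte)).foldl
      (fun s i => s ++ pvFmt06b (PySem.List.pyGetD byte i 0 - 63)) []
  let st := (PySem.List.pyRange 1 n).foldl (pvStepOuter code_string) (pvGraph0 n, (0 : Int))
  let graph := st.1
  let vertex : List Int := PySem.List.pyRange 0 (graph.size : Int)
  let edges : List (Int × Int) :=
    (PySem.List.pyRange 0 (graph.size : Int)).foldl
      (fun es i => (graph.getD i []).foldl (fun es j => es ++ [(i, j)]) es) []
  (vertex, edges)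

-- ===== PORT B =====
-- B's local 'connected(a, b)': order the pair, read bit i*(i-1)//2 + j
def pvConnB (bits : List Char) (a b : Int) : Bool :=
  let ij := if a > b then (a, b) else (b, a)
  decide (PySem.List.pyGet? bits (PySem.Int.floordiv (ij.1 * (ij.1 - 1)) 2 + ij.2) = some '1')

def converting_graph6_alt (str_graph : String) : List Int × (List (Int × Int)) :=
  let byte : List Int := str_graph.toList.map (fun c => (c.toNat : Int))
  let n : Int := PySem.List.pyGetD byte 0 0 - 63
  let bits : List Char := (byte.drop 1).flatMap (fun b => pvFmt06b (b - 63))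
  let vertex : List Int := PySem.List.pyRange 0 n
  let edges : List (Int × Int) :=
    (PySem.List.pyRange 0 n).flatMap (fun a =>
      ((PySem.List.pyRange 0 n).filter (fun b => decide (a ≠ b) && pvConnB bits a b)).map
        (fun b => (a, b)))
  (vertex, edges)

-- ===== PRECONDITION & SPEC =====
-- length of format(byte[i]-63, '06b') for a Dom_ character: 7 for tab/LF/CR (|value| ≥ 32), else 6
def pvChunkLen (c : Char) : Nat := if c.toNat < 32 then 7 else 6

-- Pre_ excludes exactly the inputs where the Python A raises IndexError: the empty string
-- (byte[0]) and strings whose unpacked bit string is shorter than the n*(n-1)/2 bits read.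
def Pre_converting_graph6 (str_graph : String) : Prop :=
  str_graph.toList ≠ [] ∧
  (((str_graph.toList.headI.toNat : Int) - 63 < 2) ∨
    ((str_graph.toList.headI.toNat : Int) - 63) * ((str_graph.toList.headI.toNat : Int) - 64) ≤
      2 * ((str_graph.toList.tail.map pvChunkLen).sum : Int))

instance (str_graph : String) : Decidable (Pre_converting_graph6 str_graph) := by
  unfold Pre_converting_graph6; infer_instance

def pvWitness_converting_graph6 : String := "D?AK"

def Spec_converting_graph6 (str_graph : String) (out : List Int × (List (Int × Int))) : Prop :=
  out = converting_graph6_alt str_graph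
instance (str_graph : String) (out : List Int × (List (Int × Int))) :
    Decidable (Spec_converting_graph6 str_graph out) := by unfold Spec_converting_graph6; infer_instance

-- ===== CLAIM (what is proved, stated in full; the proofs are below) =====
def Claim_equal_converting_graph6 : Prop := ∀ (str_graph : String), Dom_converting_graph6 str_graph → Pre_converting_graph6 str_graph → Spec_converting_graph6 str_graph (converting_graph6 str_graph)

-- ===== LEMMAS AND PROOFS =====

-- counter value when A's outer loop reaches i: i*(i-1)//2
def pvT (i : Int) : Int := PySem.Int.floordiv (i * (i - 1)) 2

-- the bit A reads for the pair (i, j), j < i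
def pvBit (C : List Char) (i j : Int) : Bool :=
  decide (PySem.List.pyGet? C (pvT i + j) = some '1')

def pvLow (C : List Char) (a : Int) : List Int :=
  (PySem.List.pyRange 0 a).filter (fun j => pvBit C a j)

-- graph[a] after A's outer loop has processed all i' < i
def pvPart (C : List Char) (i a : Int) : List Int :=
  if a < i then pvLow C a ++ (PySem.List.pyRange (a + 1) i).filter (fun b => pvBit C b a) else []

lemma pvT_succ (i : Int) : pvT i + i = pvT (i + 1) := by
  unfold pvT
  obtain ⟨k, hk⟩ : Even (i * (i - 1)) := Int.even_mul_pred_self i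
  have h1 : PySem.Int.floordiv (i * (i - 1)) 2 = k := by
    rw [PySem.Int.floordiv_eq_iff_of_pos (by norm_num)]; constructor <;> nlinarith [hk]
  have h2 : PySem.Int.floordiv ((i + 1) * (i + 1 - 1)) 2 = k + i := by
    rw [PySem.Int.floordiv_eq_iff_of_pos (by norm_num)]; constructor <;> nlinarith [hk]
  omega

lemma pvGraph0_items (n : Int) :
    (pvGraph0 n).items = (PySem.List.pyRange 0 n).map (fun i => (i, ([] : List Int))) := by
  unfold pvGraph0
  have := PySem.Dict.items_foldl_insert_fresh (PySem.List.pyRange 0 n) id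
    (fun _ => ([] : List Int)) (PySem.Dict.empty)
    (by intro a _; simp [PySem.Dict.contains_empty]) (by simpa using PySem.List.nodup_pyRange_one 0 n)
  simpa [PySem.Dict.empty] using this

lemma pvGraph0_keys (n : Int) : (pvGraph0 n).keys = PySem.List.pyRange 0 n := by
  simp [PySem.Dict.keys, pvGraph0_items, Function.comp_def]

lemma pvGraph0_getD (n : Int) (a : Int) : (pvGraph0 n).getD a [] = [] := by
  by_cases h : a ∈ PySem.List.pyRange 0 n
  · have hm : (a, ([] : List Int)) ∈ (pvGraph0 n).items := by
      rw [pvGraph0_items]; exact List.mem_map_of_mem h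
    have hnd : (pvGraph0 n).keys.Nodup := by
      rw [pvGraph0_keys]; exact PySem.List.nodup_pyRange_one 0 n
    exact PySem.Dict.getD_of_mem_items _ hm hnd []
  · exact PySem.Dict.getD_of_not_contains _ []
      (by simp [PySem.Dict.contains_eq_decide_mem_keys, pvGraph0_keys, h])

lemma pvCode_eq (byte : List Int) :
    (PySem.List.pyRange 1 (PySem.List.len byte)).foldl
      (fun s i => s ++ pvFmt06b (PySem.List.pyGetD byte i 0 - 63)) []
    = (byte.drop 1).flatMap (fun b => pvFmt06b (b - 63)) := by
  rw [PySem.List.foldl_append_eq_flatMap]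
  simp only [List.nil_append]
  have hmap : (PySem.List.pyRange 1 (PySem.List.len byte)).map (fun i => PySem.List.pyGetD byte i 0)
      = byte.drop 1 := by
    have h0 := PySem.List.map_pyGetD_pyRange_zero byte 0
    cases byte with
    | nil => simp [PySem.List.pyRange_one_eq_nil]
    | cons b t =>
        have hlen : (0 : Int) < PySem.List.len (b :: t) := by
          simp [PySem.List.len]
        rw [PySem.List.pyRange_one_cons hlen] at h0
        simp only [List.map_cons] at h0
        have := h0
        rw [show (0 : Int) + 1 = 1 by ring] at this
        simpa using congrArg List.tail this
  calc List.flatMap (fun i => pvFmt06b (PySem.List.pyGetD byte i 0 - 63)) (PySem.List.pyRange 1 (PySem.List.len byte))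
      = List.flatMap (fun b => pvFmt06b (b - 63)) ((PySem.List.pyRange 1 (PySem.List.len byte)).map (fun i => PySem.List.pyGetD byte i 0)) := by
        rw [List.flatMap_map]
    _ = _ := by rw [hmap]

lemma pvPart_succ (C : List Char) (i a : Int) (ha : a ≠ i) :
    pvPart C i a ++ (if a < i ∧ pvBit C i a then [i] else []) = pvPart C (i + 1) a := by
  unfold pvPart
  by_cases h : a < i
  · have hsplit : PySem.List.pyRange (a + 1) (i + 1) = PySem.List.pyRange (a + 1) i ++ [i] :=
      PySem.List.pyRange_one_succ_right (by omega)
    rw [if_pos h, if_pos (show a < i + 1 by omega), hsplit, List.filter_append,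
      List.filter_cons, List.filter_nil, List.append_assoc]
    by_cases hb : pvBit C i a
    · rw [if_pos ⟨h, hb⟩, if_pos hb]
    · rw [if_neg (by tauto), if_neg hb, List.append_nil]
  · have h2 : ¬ a < i + 1 := by omega
    rw [if_neg h, if_neg h2, if_neg (by tauto), List.append_nil]

lemma pvPart_self (C : List Char) (i : Int) :
    pvLow C i = pvPart C (i + 1) i := by
  unfold pvPart
  rw [if_pos (show i < i + 1 by omega),
    PySem.List.pyRange_one_eq_nil (le_refl (i + 1)), List.filter_nil, List.append_nil]

lemma pvPart_eq_filter (C : List Char) (n a : Int) (h0 : 0 ≤ a) (h1 : a < n) :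
    pvPart C n a = (PySem.List.pyRange 0 n).filter (fun b => decide (a ≠ b) && pvConnB C a b) := by
  rw [PySem.List.pyRange_one_append 0 a n h0 (by omega)]
  rw [PySem.List.pyRange_one_cons h1]
  rw [List.filter_append, List.filter_cons]
  simp only [ne_eq, not_true_eq_false, decide_false, Bool.false_and, if_neg, Bool.false_eq_true,
    not_false_eq_true]
  unfold pvPart
  rw [if_pos h1]
  congr 1
  · unfold pvLow
    apply List.filter_congr
    intro b hb
    rw [PySem.List.mem_pyRange_one] at hb
    have hab : a > b := by omega
    simp only [pvConnB, if_pos hab]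
    simp [pvBit, pvT, show a ≠ b by omega]
  · apply List.filter_congr
    intro b hb
    rw [PySem.List.mem_pyRange_one] at hb
    have hab : ¬ (a > b) := by omega
    simp only [pvConnB, if_neg hab]
    simp [pvBit, pvT, show a ≠ b by omega]

lemma keys_modify_mem (d : PySem.Dict Int (List Int)) (k : Int) (f : List Int → List Int)
    (h : k ∈ d.keys) : (d.modify k ([] : List Int) f).keys = d.keys := by
  rw [PySem.Dict.keys_modify]
  exact PySem.Dict.keys_insert_of_contains _ _ (by
    rw [PySem.Dict.contains_eq_decide_mem_keys]; simpa using h)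

lemma pvInner (C : List Char) (n i : Int) (hi : 1 ≤ i) (hin : i < n)
    (g : PySem.Dict Int (List Int)) (hk : g.keys = PySem.List.pyRange 0 n)
    (hv : ∀ a, 0 ≤ a → g.getD a [] = pvPart C i a) :
    ∀ j : Nat, (j : Int) ≤ i →
      ∃ g', (PySem.List.pyRange 0 (j : Int)).foldl (pvStepInner C i) (g, pvT i) = (g', pvT i + j) ∧
        g'.keys = PySem.List.pyRange 0 n ∧
        g'.getD i [] = (PySem.List.pyRange 0 (j : Int)).filter (fun q => pvBit C i q) ∧
        ∀ a, 0 ≤ a → a ≠ i →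
          g'.getD a [] = pvPart C i a ++ (if a < (j : Int) ∧ pvBit C i a then [i] else []) := by
  intro j
  induction j with
  | zero =>
      intro _
      refine ⟨g, ?_, hk, ?_, ?_⟩
      · simp [PySem.List.pyRange_one_eq_nil (le_refl (0 : Int))]
      · rw [show ((0 : Nat) : Int) = 0 from rfl,
          PySem.List.pyRange_one_eq_nil (le_refl (0 : Int)), List.filter_nil, hv i (by omega)]
        unfold pvPart; rw [if_neg (by omega)]
      · intro a ha _
        rw [hv a ha, if_neg (by push_cast; omega), List.append_nil]
  | succ j ih =>
      intro hj1
      have hj : (j : Int) ≤ i := by push_cast at hj1 ⊢; omega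
      have hji : (j : Int) < i := by push_cast at hj1; omega
      obtain ⟨g', hfold, hk', hgi, hga⟩ := ih hj
      have hcast : ((j + 1 : Nat) : Int) = (j : Int) + 1 := by push_cast; ring
      have hsplit : PySem.List.pyRange 0 ((j : Int) + 1)
          = PySem.List.pyRange 0 (j : Int) ++ [(j : Int)] :=
        PySem.List.pyRange_one_succ_right (by positivity)
      rw [hcast, hsplit, List.foldl_append, hfold]
      -- one step at j
      have hmemj : (j : Int) ∈ g'.keys := by
        rw [hk', PySem.List.mem_pyRange_one]; omega
      have hmemi : i ∈ g'.keys := by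
        rw [hk', PySem.List.mem_pyRange_one]; omega
      have hji' : (j : Int) ≠ i := by omega
      by_cases hb : pvBit C i (j : Int)
      · have hcond : PySem.List.pyGet? C (pvT i + (j : Int)) = some '1' := by
          simpa [pvBit] using hb
        refine ⟨(g'.modify (j : Int) [] (fun l => l ++ [i])).modify i [] (fun l => l ++ [(j : Int)]), ?_, ?_, ?_, ?_⟩
        · refine Prod.ext (by simp [pvStepInner, hcond]) (by simp [pvStepInner, hcond]; ring)
        · rw [keys_modify_mem _ _ _ (by rw [keys_modify_mem _ _ _ hmemj]; exact hmemi),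
            keys_modify_mem _ _ _ hmemj, hk']
        · rw [PySem.Dict.getD_modify, if_pos rfl, PySem.Dict.getD_modify, if_neg (by omega), hgi,
            List.filter_append, List.filter_cons, List.filter_nil, if_pos hb]
        · intro a ha hai
          rw [PySem.Dict.getD_modify, if_neg hai, PySem.Dict.getD_modify]
          by_cases haj : a = (j : Int)
          · subst haj
            rw [if_pos rfl, hga _ ha hai, if_neg (fun h => absurd h.1 (by omega)), List.append_nil,
              if_pos ⟨by omega, hb⟩]
          · rw [if_neg haj, hga a ha hai]
            have hiff : (a < (j : Int) ∧ pvBit C i a = true) ↔ (a < (j : Int) + 1 ∧ pvBit C i a = true) := by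
              constructor <;> (rintro ⟨h1, h2⟩; exact ⟨by omega, h2⟩)
            rw [if_congr hiff rfl rfl]
      · have hcond : ¬ (PySem.List.pyGet? C (pvT i + (j : Int)) = some '1') := by
          simpa [pvBit] using hb
        refine ⟨g', ?_, hk', ?_, ?_⟩
        · refine Prod.ext (by simp [pvStepInner, hcond]) (by simp [pvStepInner, hcond]; ring)
        · rw [hgi, List.filter_append, List.filter_cons, List.filter_nil,
            if_neg (by simpa using hb), List.append_nil]
        · intro a ha hai
          rw [hga a ha hai]
          have hiff : (a < (j : Int) ∧ pvBit C i a = true) ↔ (a < (j : Int) + 1 ∧ pvBit C i a = true) := by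
            constructor <;> rintro ⟨h1, h2⟩
            · exact ⟨by omega, h2⟩
            · refine ⟨?_, h2⟩
              rcases eq_or_ne a (j : Int) with rfl | hne
              · exact absurd h2 (by simpa using hb)
              · omega
          rw [if_congr hiff rfl rfl]

lemma pvPart_le_one (C : List Char) (n a : Int) (hn : n ≤ 1) (h0 : 0 ≤ a) : pvPart C n a = [] := by
  unfold pvPart
  by_cases h : a < n
  · have ha : a = 0 := by omega
    have hn1 : n = 1 := by omega
    subst ha; subst hn1
    rw [if_pos h]
    have h1 : pvLow C 0 = [] := by
      unfold pvLow; rw [PySem.List.pyRange_one_eq_nil le_rfl]; rfl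
    have h2 : PySem.List.pyRange (0 + 1 : Int) 1 = [] := PySem.List.pyRange_one_eq_nil (by omega)
    rw [h1, h2]; rfl
  · rw [if_neg h]

lemma pvOuter (C : List Char) (n : Int) :
    ∀ k : Nat, 1 + (k : Int) ≤ n →
      ∃ g, (PySem.List.pyRange 1 (1 + (k : Int))).foldl (pvStepOuter C) (pvGraph0 n, 0) = (g, pvT (1 + (k : Int))) ∧
        g.keys = PySem.List.pyRange 0 n ∧
        ∀ a, 0 ≤ a → g.getD a [] = pvPart C (1 + (k : Int)) a := by
  intro k
  induction k with
  | zero =>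
      intro hn
      refine ⟨pvGraph0 n, ?_, pvGraph0_keys n, ?_⟩
      · rw [show (1 + ((0 : Nat) : Int)) = 1 from by norm_num,
          PySem.List.pyRange_one_eq_nil le_rfl]
        simp only [List.foldl_nil]
        have : pvT 1 = 0 := by decide
        rw [this]
      · intro a ha
        rw [pvGraph0_getD, pvPart_le_one C _ a (by omega) ha]
  | succ k ih =>
      intro hn
      have hc : ((k + 1 : Nat) : Int) = (k : Int) + 1 := by push_cast; ring
      have hb : (1 : Int) + ((k + 1 : Nat) : Int) = (1 + (k : Int)) + 1 := by omega
      have hk1 : 1 + (k : Int) ≤ n := by push_cast at hn ⊢; omega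
      obtain ⟨g, hfold, hkeys, hval⟩ := ih hk1
      rw [hb, PySem.List.pyRange_one_succ_right (by omega), List.foldl_append, hfold]
      set i : Int := 1 + (k : Int) with hi
      obtain ⟨g', hfold', hkeys', hgi, hga⟩ :=
        pvInner C n i (by omega) (by omega) g hkeys hval (k + 1) (by omega)
      refine ⟨g', ?_, hkeys', ?_⟩
      · show pvStepOuter C (g, pvT i) i = (g', pvT (i + 1))
        unfold pvStepOuter
        rw [show ((k + 1 : Nat) : Int) = i from by omega] at hfold'
        rw [hfold', ← pvT_succ i]
      · intro a ha
        rcases eq_or_ne a i with rfl | hne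
        · rw [hgi, show ((k + 1 : Nat) : Int) = i from by omega]
          exact pvPart_self C i
        · rw [hga a ha hne, show ((k + 1 : Nat) : Int) = i from by omega]
          exact pvPart_succ C i a hne

lemma pvFinal (C : List Char) (n : Int) :
    ∃ g c, (PySem.List.pyRange 1 n).foldl (pvStepOuter C) (pvGraph0 n, 0) = (g, c) ∧
      g.keys = PySem.List.pyRange 0 n ∧ ∀ a, 0 ≤ a → g.getD a [] = pvPart C n a := by
  by_cases hn : 1 ≤ n
  · obtain ⟨g, hfold, hkeys, hval⟩ := pvOuter C n (n - 1).toNat (by omega)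
    rw [show (1 + (((n - 1).toNat : Nat) : Int)) = n from by omega] at hfold hval
    exact ⟨g, _, hfold, hkeys, hval⟩
  · rw [PySem.List.pyRange_one_eq_nil (by omega)]
    refine ⟨pvGraph0 n, 0, rfl, pvGraph0_keys n, ?_⟩
    intro a ha
    rw [pvGraph0_getD, pvPart_le_one C n a (by omega) ha]

lemma pvSize_int (g : PySem.Dict Int (List Int)) (n : Int)
    (hkeys : g.keys = PySem.List.pyRange 0 n) :
    PySem.List.pyRange 0 ((g.size : Nat) : Int) = PySem.List.pyRange 0 n := by
  have hsz : g.size = (PySem.List.pyRange 0 n).length := by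
    have : g.keys.length = g.size := by
      simp [PySem.Dict.keys, PySem.Dict.size]
    rw [← this, hkeys]
  rw [hsz]
  by_cases h : 0 ≤ n
  · obtain ⟨m, rfl⟩ := Int.eq_ofNat_of_zero_le h
    rw [PySem.List.pyRange_zero_natCast]; simp [PySem.List.pyRange_zero_natCast]
  · have hnil : PySem.List.pyRange 0 n = [] := PySem.List.pyRange_one_eq_nil (by omega)
    rw [hnil]
    simp

lemma pvEdges (C : List Char) (n : Int) (g : PySem.Dict Int (List Int))
    (hkeys : g.keys = PySem.List.pyRange 0 n)
    (hval : ∀ a, 0 ≤ a → g.getD a [] = pvPart C n a) :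
    (PySem.List.pyRange 0 ((g.size : Nat) : Int)).foldl
      (fun es i => (g.getD i []).foldl (fun es j => es ++ [(i, j)]) es) []
    = (PySem.List.pyRange 0 n).flatMap (fun a =>
        ((PySem.List.pyRange 0 n).filter (fun b => decide (a ≠ b) && pvConnB C a b)).map
          (fun b => (a, b))) := by
  rw [pvSize_int g n hkeys]
  have hstep : (fun (es : List (Int × Int)) (i : Int) =>
      (g.getD i []).foldl (fun es j => es ++ [(i, j)]) es)
      = fun es i => es ++ (g.getD i []).map (fun j => (i, j)) := by
    funext es i
    exact PySem.List.foldl_append_singleton_eq_map _ _ _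
  rw [hstep, PySem.List.foldl_append_eq_flatMap, List.nil_append]
  apply List.flatMap_congr
  intro a hmem
  rw [PySem.List.mem_pyRange_one] at hmem
  rw [hval a hmem.1, pvPart_eq_filter C n a hmem.1 hmem.2]

-- ===== VERDICT (by name: the statement is the Claim_ definition above) =====
theorem converting_graph6_spec : Claim_equal_converting_graph6 := by
  unfold Claim_equal_converting_graph6
  intro s _ _
  unfold Spec_converting_graph6
  simp only [converting_graph6, converting_graph6_alt]
  rw [pvCode_eq]
  obtain ⟨g, c, hfold, hkeys, hval⟩ :=
    pvFinal ((s.toList.map (fun c => ((c.toNat : Nat) : Int))).drop 1 |>.flatMap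
      (fun b => pvFmt06b (b - 63)))
      (PySem.List.pyGetD (s.toList.map (fun c => ((c.toNat : Nat) : Int))) 0 0 - 63)
  rw [hfold]
  exact Prod.ext (pvSize_int g _ hkeys) (pvEdges _ _ g hkeys hval)
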